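-- pv_equiv track=rewrite | github.com/Tamerius/EvolutionaryComputing | plot.py | checkSchemata
-- ===== SOURCE A (Python) =====
-- def optimizedCountOnes(string):
--         oneCounter = 0
--         for char in string:
--                 oneCounter += char == "1"
--         return oneCounter
--
-- def checkSchemata (population):
--         zeroSchemata = []
--         oneSchemata = []
--         zeroFitness = 0
--         oneFitness = 0
--         for individual in population:
--                 if individual[0] == "0":
--                         zeroSchemata.append(individual)
--                 else:
--                         oneSchemata.append(individual)
--         for individual in zeroSchemata:
--                 zeroFitness += optimizedCountOnes(individual)
--         for individual in oneSchemata: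
--                 oneFitness += optimizedCountOnes(individual)
--         return zeroFitness, oneFitness
-- ===== SOURCE B (Python) =====
-- def checkSchemata(population):
--         # count all ones of the whole population at once, then only the zero-group;
--         # the one-group fitness falls out by subtraction.
--         total = "".join(population).count("1")
--         zeroFitness = sum(ind.count("1") for ind in population if ind[0] == "0")
--         return zeroFitness, total - zeroFitness
-- ===== Notes on version B (the rewrite author's own statement) =====
-- stated objective: faster
-- what changed: B never partitions and never loops char-by-char: it counts all ones of the concatenated population with one str.count on ''.join(population), sums str.count only over individuals starting with '0', and obtains the one-group fitness by subtraction instead of summing it.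
import Mathlib
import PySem

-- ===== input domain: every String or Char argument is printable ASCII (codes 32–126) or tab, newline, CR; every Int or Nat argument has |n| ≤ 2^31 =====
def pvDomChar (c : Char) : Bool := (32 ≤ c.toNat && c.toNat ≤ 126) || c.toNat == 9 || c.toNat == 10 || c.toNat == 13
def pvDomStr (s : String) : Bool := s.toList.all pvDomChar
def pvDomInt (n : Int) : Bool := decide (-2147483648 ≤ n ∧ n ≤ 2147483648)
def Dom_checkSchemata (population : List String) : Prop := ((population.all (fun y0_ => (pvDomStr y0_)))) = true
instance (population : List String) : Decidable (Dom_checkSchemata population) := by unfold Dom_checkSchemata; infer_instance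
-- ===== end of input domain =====

-- B counts all ones of the joined population with a library count and derives the one-group
-- fitness by subtraction, instead of A's partition-into-lists-then-sum-each; alternative decomposition.

-- ===== PORT A =====
-- optimizedCountOnes: loop over the characters adding (char == "1")
def optCountOnes (s : String) : Int :=
  s.toList.foldl (fun oneCounter ch => oneCounter + (if ch = '1' then 1 else 0)) 0

def checkSchemata (population : List String) : Int × Int :=
  -- first loop: partition into zeroSchemata / oneSchemata by individual[0]
  let p := population.foldl
    (fun (p : List String × List String) individual =>
      if PySem.Str.pyGet? individual 0 = some '0'
      then (p.1 ++ [individual], p.2) else (p.1, p.2 ++ [individual]))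
    ([], [])
  -- second loop: zeroFitness
  let zeroFitness := p.1.foldl (fun acc individual => acc + optCountOnes individual) 0
  -- third loop: oneFitness
  let oneFitness := p.2.foldl (fun acc individual => acc + optCountOnes individual) 0
  (zeroFitness, oneFitness)

-- ===== PORT B =====
def checkSchemata_alt (population : List String) : Int × Int :=
  -- total = "".join(population).count("1")
  let total : Int := (PySem.Str.count (PySem.Str.join "" population) "1" : Int)
  -- zeroFitness = sum(ind.count("1") for ind in population if ind[0] == "0")
  let zeroFitness : Int :=
    ((population.filter (fun ind => PySem.Str.pyGet? ind 0 == some '0')).map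
      (fun ind => (PySem.Str.count ind "1" : Int))).sum
  (zeroFitness, total - zeroFitness)

-- ===== PRECONDITION & SPEC =====
-- Pre_ excludes populations containing an empty string: there individual[0] raises IndexError in both A and B.
def Pre_checkSchemata (population : List String) : Prop := ∀ s ∈ population, s ≠ ""
instance (population : List String) : Decidable (Pre_checkSchemata population) := by unfold Pre_checkSchemata; infer_instance
def pvWitness_checkSchemata : List String := (["010", "110", "0"])

def Spec_checkSchemata (population : List String) (out : Int × Int) : Prop := out = checkSchemata_alt population
instance (population : List String) (out : Int × Int) : Decidable (Spec_checkSchemata population out) := by unfold Spec_checkSchemata; infer_instance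

-- ===== CLAIM (what is proved, stated in full; the proofs are below) =====
def Claim_equal_checkSchemata : Prop := ∀ (population : List String), Dom_checkSchemata population → Pre_checkSchemata population → Spec_checkSchemata population (checkSchemata population)

-- ===== LEMMAS AND PROOFS =====

-- str.count with a single-character needle is the character count (go carries fuel ≥ length)
theorem count_go_single (fuel : Nat) (l : List Char) (acc : Nat) (h : l.length ≤ fuel) :
    PySem.Chars.count.go ['1'] fuel l acc = acc + l.count '1' := by
  induction fuel generalizing l acc with
  | zero =>
      have : l = [] := List.eq_nil_of_length_eq_zero (Nat.le_zero.mp h)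
      subst this
      simp [PySem.Chars.count.go]
  | succ n ih =>
      cases l with
      | nil => simp [PySem.Chars.count.go]
      | cons c t =>
          simp only [PySem.Chars.count.go]
          have ht : t.length ≤ n := by simpa using Nat.succ_le_succ_iff.mp h
          by_cases hc : c = '1'
          · subst hc
            simp [List.isPrefixOf, ih _ _ ht]
            omega
          · have hpre : (['1'].isPrefixOf (c :: t)) = false := by
              simp [List.isPrefixOf]
              exact fun e => hc e.symm
            simp [hpre, ih _ _ ht, hc]

theorem strCount_one (s : String) : PySem.Str.count s "1" = s.toList.count '1' := by
  have h := count_go_single s.toList.length s.toList 0 (Nat.le_refl _)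
  simpa [PySem.Str.count, PySem.Chars.count] using h

-- A's hand-written char loop is the character count too
theorem optCountOnes_eq (s : String) : optCountOnes s = (s.toList.count '1' : Int) := by
  unfold optCountOnes
  induction s.toList using List.reverseRecOn with
  | nil => simp
  | append_singleton t c ih =>
      simp [List.foldl_append, List.count_append, ih]
      by_cases hc : c = '1' <;> simp [hc]

-- A's partition loop appends the filtered sublists to the accumulators
theorem partition_fold (population : List String) (zs os : List String) :
    population.foldl
      (fun (p : List String × List String) individual =>
        if PySem.Str.pyGet? individual 0 = some '0'
        then (p.1 ++ [individual], p.2) else (p.1, p.2 ++ [individual]))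
      (zs, os)
    = (zs ++ population.filter (fun ind => PySem.Str.pyGet? ind 0 == some '0'),
       os ++ population.filter (fun ind => !(PySem.Str.pyGet? ind 0 == some '0'))) := by
  induction population generalizing zs os with
  | nil => simp
  | cons x xs ih =>
      simp only [List.foldl_cons, List.filter_cons]
      cases hb : (PySem.Str.pyGet? x 0 == some '0') with
      | true =>
          rw [if_pos (beq_iff_eq.mp hb), ih]
          simp
      | false =>
          rw [if_neg (beq_eq_false_iff_ne.mp hb), ih]
          simp

-- summing a map over a filter and its complement recovers the whole sum
theorem sum_filter_split (l : List String) (p : String → Bool) (f : String → Int) :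
    ((l.filter p).map f).sum + ((l.filter (fun x => !p x)).map f).sum = (l.map f).sum := by
  induction l with
  | nil => simp
  | cons x t ih =>
      by_cases h : p x <;> simp [h] <;> omega

-- ===== VERDICT (by name: the statement is the Claim_ definition above) =====
theorem checkSchemata_spec : Claim_equal_checkSchemata := by
  intro population _ _
  unfold Spec_checkSchemata checkSchemata checkSchemata_alt
  rw [partition_fold]
  simp only [List.nil_append]
  rw [PySem.List.foldl_add (g := optCountOnes), PySem.List.foldl_add (g := optCountOnes)]
  simp only [zero_add]
  have hmap : ∀ l : List String,
      (l.map optCountOnes) = l.map (fun ind => (PySem.Str.count ind "1" : Int)) := by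
    intro l
    apply List.map_congr_left
    intro x _
    rw [optCountOnes_eq, strCount_one]
  have htotal : (PySem.Str.count (PySem.Str.join "" population) "1" : Int)
      = (population.map (fun ind => (PySem.Str.count ind "1" : Int))).sum := by
    have hjoin : (PySem.Str.join "" population).toList
        = (population.map String.toList).flatten := by
      simp only [PySem.Str.join, PySem.Chars.join, String.toList_ofList]
      have : (("" : String).toList) = ([] : List Char) := rfl
      rw [this]
      induction (population.map String.toList) with
      | nil => simp [List.intercalate]
      | cons a t ih => cases t <;> simp_all [List.intercalate, List.intersperse]
    rw [strCount_one, hjoin, List.count_flatten]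
    have : population.map (fun ind => (PySem.Str.count ind "1" : Int))
        = population.map (fun ind => ((ind.toList.count '1' : Nat) : Int)) := by
      apply List.map_congr_left; intro x _; rw [strCount_one]
    rw [this, List.map_map]
    push_cast
    simp [Function.comp_def]
  rw [hmap, hmap, htotal, Prod.mk.injEq]
  refine ⟨rfl, ?_⟩
  rw [← sum_filter_split population (fun ind => PySem.Str.pyGet? ind 0 == some '0')
      (fun ind => (PySem.Str.count ind "1" : Int))]
  ring
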